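-- pv_equiv track=rewrite | github.com/broadinstitute/gatk-sv | dockerfiles/rdpesr/calcu_inheri_stat.py | inheri_hash_to_stat
-- ===== SOURCE A (Python) =====
-- def inheri_hash_to_stat(inheri_hash):
--     inheri_stat = {}
--     for child in inheri_hash.keys():
--         inheri_stat[child] = {}
--         for rec in inheri_hash[child]:
--             if not rec[1] in inheri_stat[child].keys():
--                 inheri_stat[child][rec[1]] = {}
--             if not rec[0] in inheri_stat[child][rec[1]].keys():
--                 inheri_stat[child][rec[1]][rec[0]] = 0
--             inheri_stat[child][rec[1]][rec[0]] += 1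
--     return inheri_stat
-- ===== SOURCE B (Python) =====
-- def inheri_hash_to_stat(inheri_hash):
--     stat = {}
--     for child, recs in inheri_hash.items():
--         per = {}
--         for r1 in dict.fromkeys(b for _, b in recs):
--             grp = [a for a, b in recs if b == r1]
--             per[r1] = {a: grp.count(a) for a in dict.fromkeys(grp)}
--         stat[child] = per
--     return stat
-- ===== Notes on version B (the rewrite author's own statement) =====
-- stated objective: alternative
-- what changed: Replaces A's incremental mutation of a nested dict (membership tests plus in-place increments per record) by a declarative group-and-count decomposition: per child, dedup the second components, filter each group's first components, and build each inner dict by counting occurrences.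
import Mathlib
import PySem

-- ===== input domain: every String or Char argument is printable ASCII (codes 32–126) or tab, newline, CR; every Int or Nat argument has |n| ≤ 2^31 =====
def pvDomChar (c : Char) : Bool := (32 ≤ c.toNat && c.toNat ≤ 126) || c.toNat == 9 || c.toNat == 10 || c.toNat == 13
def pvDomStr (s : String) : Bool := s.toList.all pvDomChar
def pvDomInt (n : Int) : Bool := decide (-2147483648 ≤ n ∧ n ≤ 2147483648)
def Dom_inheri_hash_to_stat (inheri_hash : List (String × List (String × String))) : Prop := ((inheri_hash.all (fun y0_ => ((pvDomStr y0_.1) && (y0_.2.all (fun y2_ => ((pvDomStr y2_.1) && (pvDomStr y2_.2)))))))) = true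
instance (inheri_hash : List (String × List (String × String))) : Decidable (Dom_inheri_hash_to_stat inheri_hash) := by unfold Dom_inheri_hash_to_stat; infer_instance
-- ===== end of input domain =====

-- B replaces A's record-by-record mutation of a nested dict by a per-child group-and-count
-- decomposition (dedup keys, filter the group, count occurrences); same return value, similar cost.

-- ===== PORT A =====
-- one record: the two membership tests, the conditional initialisations and the increment
def pvStepRec (st : PySem.Dict String (PySem.Dict String Int)) (rec : String × String) :
    PySem.Dict String (PySem.Dict String Int) :=
  let st1 := if st.contains rec.2 then st else st.insert rec.2 PySem.Dict.empty
  let inner := st1.getD rec.2 PySem.Dict.empty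
  let inner1 := if inner.contains rec.1 then inner else inner.insert rec.1 0
  st1.insert rec.2 (inner1.insert rec.1 (inner1.getD rec.1 0 + 1))

-- the inner 'for rec in inheri_hash[child]' loop, starting from inheri_stat[child] = {}
def pvChildStat (recs : List (String × String)) : PySem.Dict String (PySem.Dict String Int) :=
  recs.foldl pvStepRec PySem.Dict.empty

def inheri_hash_to_stat (inheri_hash : List (String × List (String × String))) : List (String × List (String × List (String × Int))) :=
  (((PySem.Dict.ofList inheri_hash).keys.foldl
      (fun big child => big.insert child (pvChildStat ((PySem.Dict.ofList inheri_hash).getD child [])))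
      PySem.Dict.empty).items).map (fun p => (p.1, p.2.items.map (fun q => (q.1, q.2.items))))

-- ===== PORT B =====
-- per child: dedup of the rec[1] values; for each, the group's rec[0] values, deduped and counted
def pvAltChild (recs : List (String × String)) : List (String × List (String × Int)) :=
  (PySem.List.dedup (recs.map (fun rec => rec.2))).map (fun r1 =>
    let grp := (recs.filter (fun rec => rec.2 == r1)).map (fun rec => rec.1)
    (r1, (PySem.List.dedup grp).map (fun r0 => (r0, (grp.count r0 : Int)))))

def inheri_hash_to_stat_alt (inheri_hash : List (String × List (String × String))) : List (String × List (String × List (String × Int))) :=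
  (PySem.Dict.ofList inheri_hash).items.map (fun p => (p.1, pvAltChild p.2))

-- ===== PRECONDITION & SPEC =====
def Spec_inheri_hash_to_stat (inheri_hash : List (String × List (String × String))) (out : List (String × List (String × List (String × Int)))) : Prop := out = inheri_hash_to_stat_alt inheri_hash
instance (inheri_hash : List (String × List (String × String))) (out : List (String × List (String × List (String × Int)))) : Decidable (Spec_inheri_hash_to_stat inheri_hash out) := by unfold Spec_inheri_hash_to_stat; infer_instance

-- ===== CLAIM (what is proved, stated in full; the proofs are below) =====
def Claim_equal_inheri_hash_to_stat : Prop := ∀ (inheri_hash : List (String × List (String × String))), Dom_inheri_hash_to_stat inheri_hash → Spec_inheri_hash_to_stat inheri_hash (inheri_hash_to_stat inheri_hash)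

-- ===== LEMMAS AND PROOFS =====

-- A's per-record step is a nested counting modify
theorem pvStepRec_eq (st : PySem.Dict String (PySem.Dict String Int)) (rec : String × String) :
    pvStepRec st rec = st.modify rec.2 PySem.Dict.empty (fun inner => inner.modify rec.1 0 (· + 1)) := by
  unfold pvStepRec PySem.Dict.modify
  by_cases hc : st.contains rec.2
  · simp only [hc, if_true]
    by_cases hi : (st.getD rec.2 PySem.Dict.empty).contains rec.1
    · simp [hi]
    · simp only [Bool.not_eq_true] at hi
      simp [hi, PySem.Dict.insert_insert_self, PySem.Dict.getD_insert_self,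
        PySem.Dict.getD_of_not_contains _ _ hi]
  · simp only [Bool.not_eq_true] at hc
    simp [hc, PySem.Dict.insert_insert_self, PySem.Dict.getD_insert_self,
      PySem.Dict.getD_of_not_contains _ _ hc, PySem.Dict.contains_empty, PySem.Dict.getD_empty]

theorem pvChildStat_eq (recs : List (String × String)) :
    pvChildStat recs = recs.foldl (fun st rec => st.modify rec.2 PySem.Dict.empty (fun inner => inner.modify rec.1 0 (· + 1))) PySem.Dict.empty := by
  unfold pvChildStat
  rw [show pvStepRec = fun st rec => st.modify rec.2 PySem.Dict.empty (fun inner => inner.modify rec.1 0 (· + 1)) from funext fun st => funext fun rec => pvStepRec_eq st rec]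

theorem pvFold_getD (l : List (String × String)) (d : PySem.Dict String (PySem.Dict String Int)) (r1 : String) :
    (l.foldl (fun st rec => st.modify rec.2 PySem.Dict.empty (fun inner => inner.modify rec.1 0 (· + 1))) d).getD r1 PySem.Dict.empty
      = ((l.filter (fun rec => rec.2 == r1)).map (fun rec => rec.1)).foldl (fun inner r0 => inner.modify r0 0 (· + 1)) (d.getD r1 PySem.Dict.empty) := by
  induction l generalizing d with
  | nil => rfl
  | cons rec l ih =>
    simp only [List.foldl_cons, List.filter_cons]
    by_cases h : rec.2 = r1
    · simp only [h, BEq.rfl, if_true, List.map_cons, List.foldl_cons]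
      rw [ih, PySem.Dict.getD_modify_self]
    · have hb : (rec.2 == r1) = false := by simp [h]
      simp only [hb, Bool.false_eq_true, if_false]
      rw [ih, PySem.Dict.getD_modify_of_ne _ _ _ (fun he => h he.symm)]

theorem pvChildStat_getD (recs : List (String × String)) (r1 : String) :
    (pvChildStat recs).getD r1 PySem.Dict.empty
      = PySem.Dict.counter ((recs.filter (fun rec => rec.2 == r1)).map (fun rec => rec.1)) := by
  rw [pvChildStat_eq, pvFold_getD, PySem.Dict.counter_eq_foldl, PySem.Dict.getD_empty]

theorem pvChildStat_keys (recs : List (String × String)) :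
    (pvChildStat recs).keys = PySem.Set.ofList (recs.map (fun rec => rec.2)) := by
  rw [pvChildStat_eq,
    PySem.Dict.keys_foldl_modify_key recs (fun rec => rec.2) PySem.Dict.empty
      (fun _ rec => fun inner => inner.modify rec.1 0 (· + 1)) PySem.Dict.empty]
  simp [PySem.Dict.keys_empty, PySem.Set.update_nil_left]

theorem pvChildStat_nodup (recs : List (String × String)) : (pvChildStat recs).keys.Nodup := by
  rw [pvChildStat_eq]
  exact PySem.Dict.nodup_keys_foldl_modify_key recs (fun rec => rec.2) PySem.Dict.empty
    (fun _ rec => fun inner => inner.modify rec.1 0 (· + 1)) PySem.Dict.empty (by simp)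

theorem pvChildStat_items (recs : List (String × String)) :
    (pvChildStat recs).items.map (fun q => (q.1, q.2.items)) = pvAltChild recs := by
  rw [PySem.Dict.items_eq_map_keys _ (pvChildStat_nodup recs) PySem.Dict.empty, pvChildStat_keys]
  unfold pvAltChild
  rw [PySem.List.dedup_eq_ofList, List.map_map]
  refine List.map_congr_left (fun r1 _ => ?_)
  simp only [Function.comp]
  rw [pvChildStat_getD, PySem.Dict.items_counter, PySem.List.dedup_eq_ofList]

theorem inheri_hash_to_stat_spec : Claim_equal_inheri_hash_to_stat := by
  intro inheri_hash _
  unfold Spec_inheri_hash_to_stat inheri_hash_to_stat inheri_hash_to_stat_alt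
  have hnd := PySem.Dict.nodup_keys_ofList inheri_hash
  rw [PySem.Dict.items_foldl_insert_fresh (PySem.Dict.ofList inheri_hash).keys (fun a => a)
      (fun a => pvChildStat ((PySem.Dict.ofList inheri_hash).getD a [])) PySem.Dict.empty
      (fun a _ => PySem.Dict.contains_empty a) (by simp only [List.map_id_fun']; simp [hnd])]
  rw [PySem.Dict.items_eq_map_keys _ hnd []]
  simp only [PySem.Dict.empty, List.nil_append, List.map_map]
  refine List.map_congr_left (fun c _ => ?_)
  simp only [Function.comp]
  rw [pvChildStat_items]
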